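-- pv_equiv track=rewrite | github.com/Gus0519/Juego_UNO | funciones_Uno/desempate.py | desempate
-- ===== SOURCE A (Python) =====
-- def desempate(cartas_por_jugador,nombres):
--     sum_valores_por_jugador = []
--
--     for nombre in nombres: #Por cada jugador
--         suma = 0
--         for carta in cartas_por_jugador[nombre]: #Por cada carta de cada jugador
--             suma += carta[1]
--         sum_valores_por_jugador.append(suma)
--
--     ganador = nombres[sum_valores_por_jugador.index(min(sum_valores_por_jugador))]
--
--     return ganador
-- ===== SOURCE B (Python) =====
-- def desempate(cartas_por_jugador, nombres):
--     # Sort the players by their total card value (stable, so the first of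
--     # several tied minima keeps its original position) and take the first.
--     orden = sorted(nombres, key=lambda n: sum(carta[1] for carta in cartas_por_jugador[n]))
--     return orden[0]
-- ===== Notes on version B (the rewrite author's own statement) =====
-- stated objective: alternative
-- what changed: A builds a parallel list of per-player sums, then runs min over that list, then list.index, then an indexed lookup; B instead sorts the players by their total card value with a stable sort and returns the head of the sorted order (stability gives the same first-tie-wins winner).
import Mathlib
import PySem

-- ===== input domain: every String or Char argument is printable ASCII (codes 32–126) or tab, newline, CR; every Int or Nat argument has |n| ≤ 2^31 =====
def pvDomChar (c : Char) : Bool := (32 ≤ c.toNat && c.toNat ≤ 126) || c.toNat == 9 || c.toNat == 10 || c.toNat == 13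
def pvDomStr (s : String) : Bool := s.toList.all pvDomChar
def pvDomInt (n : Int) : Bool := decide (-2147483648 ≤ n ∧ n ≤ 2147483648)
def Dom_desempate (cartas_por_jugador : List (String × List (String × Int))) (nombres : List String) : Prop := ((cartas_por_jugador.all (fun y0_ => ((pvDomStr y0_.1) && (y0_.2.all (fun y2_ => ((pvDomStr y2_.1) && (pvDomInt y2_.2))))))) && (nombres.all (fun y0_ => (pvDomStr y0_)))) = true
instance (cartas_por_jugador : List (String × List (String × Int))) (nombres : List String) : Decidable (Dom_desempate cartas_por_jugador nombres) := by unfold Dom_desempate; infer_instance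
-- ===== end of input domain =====

-- B replaces A's sums-table + min + .index + indexed-lookup pipeline by a stable sort of the
-- players on their total card value followed by taking the head of the sorted order.

-- dict lookup d[k] under the association-list convention: first matching key
def pvLookup (d : List (String × List (String × Int))) (k : String) : Option (List (String × Int)) :=
  (d.find? (fun p => p.1 == k)).map (·.2)

-- ===== PORT A =====
def desempate (cartas_por_jugador : List (String × List (String × Int))) (nombres : List String) : String :=
  let sums := nombres.foldl
    (fun acc nombre =>
      acc ++ [((pvLookup cartas_por_jugador nombre).getD []).foldl (fun suma carta => suma + carta.2) 0]) []
  match PySem.List.min? sums (fun x => x) with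
  | none => ""          -- nombres = []: Python's min raises ValueError (excluded by Pre_)
  | some v =>
    match PySem.List.index? sums v with
    | none => ""        -- unreachable: v is a member of sums
    | some i => (PySem.List.pyGet? nombres (i : Int)).getD ""

-- ===== PORT B =====
def desempate_alt (cartas_por_jugador : List (String × List (String × Int))) (nombres : List String) : String :=
  let orden := PySem.List.sorted nombres
    (fun n => ((pvLookup cartas_por_jugador n).getD []).foldl (fun suma carta => suma + carta.2) 0)
  (PySem.List.pyGet? orden (0 : Int)).getD ""
  -- getD "" is only the totalization of orden[0]'s IndexError on empty nombres (excluded by Pre_)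

-- ===== PRECONDITION & SPEC =====
-- Python A raises ValueError via min on empty nombres and KeyError when a nombre is not a key
-- of cartas_por_jugador; exactly those inputs are excluded.
def Pre_desempate (cartas_por_jugador : List (String × List (String × Int))) (nombres : List String) : Prop :=
  nombres ≠ [] ∧ ∀ n ∈ nombres, (pvLookup cartas_por_jugador n).isSome

instance (cartas_por_jugador : List (String × List (String × Int))) (nombres : List String) : Decidable (Pre_desempate cartas_por_jugador nombres) := by unfold Pre_desempate; infer_instance

def pvWitness_desempate : (List (String × List (String × Int))) × List String :=
  ([("ana", [("5", 5), ("2", 2)]), ("bob", [("3", 3)])], ["ana", "bob"])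

def Spec_desempate (cartas_por_jugador : List (String × List (String × Int))) (nombres : List String) (out : String) : Prop := out = desempate_alt cartas_por_jugador nombres
instance (cartas_por_jugador : List (String × List (String × Int))) (nombres : List String) (out : String) : Decidable (Spec_desempate cartas_por_jugador nombres out) := by unfold Spec_desempate; infer_instance

-- ===== CLAIM (what is proved, stated in full; the proofs are below) =====
def Claim_equal_desempate : Prop := ∀ (cartas_por_jugador : List (String × List (String × Int))) (nombres : List String), Dom_desempate cartas_por_jugador nombres → Pre_desempate cartas_por_jugador nombres → Spec_desempate cartas_por_jugador nombres (desempate cartas_por_jugador nombres)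

-- ===== LEMMAS AND PROOFS =====

-- reference: first element of the list attaining the minimal key
def refMin? {α : Type} (f : α → Int) : List α → Option α
  | [] => none
  | n :: t => some ((refMin? f t).elim n (fun m => if f n ≤ f m then n else m))

theorem min?_cons_aux {α : Type} (f : α → Int) (t : List α) (a : α) :
    PySem.List.min? (a :: t) f
      = some ((refMin? f t).elim a (fun m => if f a ≤ f m then a else m)) := by
  induction t generalizing a with
  | nil => rfl
  | cons x t ih =>
    have h1 : PySem.List.min? (a :: x :: t) f
        = PySem.List.min? ((if f x < f a then x else a) :: t) f := by
      by_cases h : f x < f a <;> simp [PySem.List.min?, h]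
    rw [h1, ih]
    simp only [refMin?]
    cases hr : refMin? f t with
    | none =>
      simp only [Option.elim_none, Option.elim_some]
      split_ifs <;> first | rfl | (exfalso; omega)
    | some m =>
      simp only [Option.elim_some]
      split_ifs <;> first | rfl | (exfalso; omega)

theorem min?_eq_refMin? {α : Type} (f : α → Int) (ns : List α) :
    PySem.List.min? ns f = refMin? f ns := by
  cases ns with
  | nil => rfl
  | cons n t => rw [min?_cons_aux]; simp [refMin?]

theorem refMin?_map {α : Type} (f : α → Int) (ns : List α) :
    refMin? (fun x => x) (ns.map f) = (refMin? f ns).map f := by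
  induction ns with
  | nil => rfl
  | cons n t ih =>
    simp only [List.map_cons, refMin?, ih]
    cases refMin? f t with
    | none => rfl
    | some m => simp only [Option.map_some, Option.elim_some]; split_ifs <;> rfl

theorem refMin?_eq_none {α : Type} (f : α → Int) (ns : List α) :
    refMin? f ns = none ↔ ns = [] := by
  cases ns <;> simp [refMin?]

theorem refMin?_mem {α : Type} (f : α → Int) (ns : List α) (m : α)
    (h : refMin? f ns = some m) : m ∈ ns := by
  induction ns with
  | nil => cases h
  | cons n t ih =>
    simp only [refMin?] at h
    cases hr : refMin? f t with
    | none => rw [hr] at h; simp only [Option.elim_none, Option.some.injEq] at h; subst h; exact List.mem_cons_self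
    | some m' =>
      rw [hr] at h
      simp only [Option.elim_some, Option.some.injEq] at h
      by_cases hle : f n ≤ f m'
      · rw [if_pos hle] at h; subst h; exact List.mem_cons_self
      · rw [if_neg hle] at h; subst h; exact List.mem_cons_of_mem _ (ih hr)

-- A's pipeline on an explicit sums table ns.map f
def aCore (f : String → Int) (ns : List String) : String :=
  match PySem.List.min? (ns.map f) (fun x => x) with
  | none => ""
  | some v =>
    match PySem.List.index? (ns.map f) v with
    | none => ""
    | some i => (PySem.List.pyGet? ns (i : Int)).getD ""

theorem foldl_append_map (f : String → Int) (ns : List String) (acc : List Int) :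
    ns.foldl (fun acc n => acc ++ [f n]) acc = acc ++ ns.map f := by
  induction ns generalizing acc with
  | nil => simp
  | cons n t ih => simp [ih]

theorem desempate_eq_aCore (cartas : List (String × List (String × Int))) (ns : List String) :
    desempate cartas ns
      = aCore (fun n => ((pvLookup cartas n).getD []).foldl (fun suma carta => suma + carta.2) 0) ns := by
  unfold desempate aCore
  rw [foldl_append_map]
  rfl

theorem aCore_eq_refMin? (f : String → Int) (ns : List String) :
    aCore f ns = (refMin? f ns).getD "" := by
  induction ns with
  | nil => rfl
  | cons n t ih =>
    unfold aCore
    rw [min?_eq_refMin?, refMin?_map]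
    cases hr : refMin? f t with
    | none =>
      have ht : t = [] := (refMin?_eq_none f t).mp hr
      subst ht
      simp [refMin?]
    | some m =>
      simp only [refMin?, hr, Option.elim_some, List.map_cons]
      by_cases hle : f n ≤ f m
      · rw [if_pos hle]
        simp only [Option.map_some]
        rw [PySem.List.index?_cons_self]
        simp
      · rw [if_neg hle]
        simp only [Option.map_some]
        have hne : f n ≠ f m := by omega
        rw [PySem.List.index?_cons_of_ne _ hne]
        have hmem : f m ∈ t.map f := List.mem_map_of_mem (refMin?_mem f t m hr)
        obtain ⟨i, hi⟩ := Option.isSome_iff_exists.mp ((PySem.List.index?_isSome_iff _ _).mpr hmem)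
        rw [hi]
        simp only [Option.map_some, Option.getD_some]
        have haux : aCore f t = (PySem.List.pyGet? t (i : Int)).getD "" := by
          unfold aCore
          rw [min?_eq_refMin?, refMin?_map, hr]
          simp only [Option.map_some]
          rw [hi]
        have hres : (PySem.List.pyGet? t (i : Int)).getD "" = m := by
          rw [← haux, ih, hr]; rfl
        rw [← hres]
        have hcast : ((i + 1 : Nat) : Int) = ((i : Nat) : Int) + 1 := by push_cast; ring
        rw [hcast, PySem.List.pyGet?_cons_succ]

-- head of one insertion step of the stable insertion sort
theorem head?_insertBy (f : String → Int) (x : String) (ys : List String) :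
    (PySem.List.insertBy (fun a b => decide (f a < f b)) x ys).head?
      = some (ys.head?.elim x (fun y => if f x < f y then x else y)) := by
  cases ys with
  | nil => rfl
  | cons y t =>
    simp only [PySem.List.insertBy]
    by_cases h : f x < f y <;> simp [h]

-- the head of the insertion-sort foldl is the strict-< running minimum
theorem head?_foldl_insertBy (f : String → Int) (ns : List String) (acc : List String) :
    (ns.foldl (fun acc x => PySem.List.insertBy (fun a b => decide (f a < f b)) x acc) acc).head?
      = ns.foldl (fun o x => some (o.elim x (fun m => if f x < f m then x else m))) acc.head? := by
  induction ns generalizing acc with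
  | nil => rfl
  | cons x t ih =>
    simp only [List.foldl_cons]
    rw [ih, head?_insertBy]

-- the strict-< left running minimum agrees with refMin? (both pick the FIRST minimal element)
theorem foldl_strict_min (f : String → Int) (ns : List String) (m : String) :
    ns.foldl (fun o x => some (o.elim x (fun m => if f x < f m then x else m))) (some m)
      = some ((refMin? f ns).elim m (fun r => if f r < f m then r else m)) := by
  induction ns generalizing m with
  | nil => rfl
  | cons x t ih =>
    simp only [List.foldl_cons, Option.elim_some, refMin?]
    rw [ih]
    cases hr : refMin? f t with
    | none =>
      have ht : t = [] := (refMin?_eq_none f t).mp hr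
      subst ht
      simp only [Option.elim_none]
    | some r =>
      simp only [Option.elim_some, Option.some.injEq]
      split_ifs <;> first | rfl | (exfalso; omega)

theorem sorted_head_eq_refMin? (f : String → Int) (ns : List String) :
    (PySem.List.sorted ns f).head? = refMin? f ns := by
  rw [PySem.List.sorted_eq_foldl_insertBy, head?_foldl_insertBy]
  cases ns with
  | nil => rfl
  | cons n t =>
    simp only [List.foldl_cons, List.head?_nil, Option.elim_none]
    rw [foldl_strict_min]
    simp only [refMin?]
    cases hr : refMin? f t with
    | none => rfl
    | some r =>
      simp only [Option.elim_some, Option.some.injEq]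
      split_ifs <;> first | rfl | (exfalso; omega)

theorem pyGet?_zero_eq_head? (xs : List String) :
    PySem.List.pyGet? xs (0 : Int) = xs.head? := by
  cases xs with
  | nil => rfl
  | cons x t => simp [PySem.List.pyGet?, PySem.List.pyIdx?]

theorem desempate_alt_eq_refMin? (cartas : List (String × List (String × Int))) (ns : List String) :
    desempate_alt cartas ns
      = (refMin? (fun n => ((pvLookup cartas n).getD []).foldl (fun suma carta => suma + carta.2) 0) ns).getD "" := by
  unfold desempate_alt
  simp only [pyGet?_zero_eq_head?, sorted_head_eq_refMin?]

-- ===== VERDICT (by name: the statement is the Claim_ definition above) =====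
theorem desempate_spec : Claim_equal_desempate := by
  intro cartas nombres _hdom _hpre
  unfold Spec_desempate
  rw [desempate_eq_aCore, aCore_eq_refMin?, desempate_alt_eq_refMin?]
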